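-- pv_equiv track=rewrite | github.com/nqtruowng/expert_system | web_app.py | format_key
-- ===== SOURCE A (Python) =====
-- from typing import Any, Callable, Dict, List, Tuple
--
-- def format_key(key: str) -> str:
--     words = key.split()
--     temp: List[str] = []
--     for word in words:
--         if word == "-":
--             break
--         temp.append(word)
--     return " ".join(temp)
-- ===== SOURCE B (Python) =====
-- def format_key(key: str) -> str:
--     s = " ".join(key.split())
--     padded = " " + s + " "
--     i = padded.find(" - ")
--     return s if i == -1 else padded[1:i]
-- ===== Notes on version B (the rewrite author's own statement) =====
-- stated objective: alternative
-- what changed: Instead of A's accumulate-words-until-break loop, B first joins the split words into one space-normalized string, then locates the first standalone dash token by a substring search over the space-padded string and returns the prefix before it.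
import Mathlib
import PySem

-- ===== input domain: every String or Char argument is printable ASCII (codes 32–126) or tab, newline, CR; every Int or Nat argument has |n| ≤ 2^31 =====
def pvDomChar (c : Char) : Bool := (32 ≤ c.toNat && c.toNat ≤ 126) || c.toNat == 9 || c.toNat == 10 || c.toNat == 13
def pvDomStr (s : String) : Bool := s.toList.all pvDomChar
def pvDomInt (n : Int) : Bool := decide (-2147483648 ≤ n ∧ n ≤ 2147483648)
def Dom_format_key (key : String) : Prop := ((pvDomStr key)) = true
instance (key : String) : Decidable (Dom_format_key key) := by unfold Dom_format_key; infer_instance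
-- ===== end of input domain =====

-- B normalizes the words into one flat string and cuts it at the first " - " substring found
-- by string search, instead of A's word-by-word accumulator loop; objective: alternative.

-- ===== PORT A =====
-- the for-loop with break: append words until the first "-"
def format_key_loop : List String → List String
  | [] => []
  | w :: ws => if w == "-" then [] else w :: format_key_loop ws

def format_key (key : String) : String :=
  let words := PySem.Str.split₀ key
  PySem.Str.join " " (format_key_loop words)

-- ===== PORT B =====
def format_key_alt (key : String) : String :=
  let s := PySem.Str.join " " (PySem.Str.split₀ key)
  let padded := " " ++ s ++ " "
  let i := PySem.Str.find padded " - "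
  if i == -1 then s else PySem.Str.slice padded (some 1) (some i)

-- ===== PRECONDITION & SPEC =====
def Spec_format_key (key : String) (out : String) : Prop := out = format_key_alt key
instance (key : String) (out : String) : Decidable (Spec_format_key key out) := by unfold Spec_format_key; infer_instance

-- ===== CLAIM (what is proved, stated in full; the proofs are below) =====
def Claim_equal_format_key : Prop := ∀ (key : String), Dom_format_key key → Spec_format_key key (format_key key)

-- ===== LEMMAS AND PROOFS =====

-- a word is "good" when it is nonempty and contains no space character
def pvGood (w : List Char) : Prop := w ≠ [] ∧ ' ' ∉ w

-- A's loop at the char-list level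
def pvCut : List (List Char) → List (List Char)
  | [] => []
  | w :: ws => if w = ['-'] then [] else w :: pvCut ws

theorem pv_cut_of_not_mem (ws : List (List Char)) (h : ['-'] ∉ ws) : pvCut ws = ws := by
  induction ws with
  | nil => rfl
  | cons w ws ih =>
    simp only [List.mem_cons, not_or] at h
    rw [pvCut, if_neg (fun e => h.1 e.symm)]
    exact congrArg _ (ih h.2)

theorem pv_map_toList_loop (ws : List String) :
    (format_key_loop ws).map String.toList = pvCut (ws.map String.toList) := by
  induction ws with
  | nil => rfl
  | cons w ws ih =>
    by_cases hw : w = "-"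
    · subst hw; simp [format_key_loop, pvCut]
    · rw [format_key_loop, if_neg (by simpa using hw), List.map_cons, List.map_cons, pvCut,
        if_neg (by intro h; exact hw (String.toList_inj.mp (by simpa using h))), ih]

theorem pv_flatMap_eq (ws : List (List Char)) (h : ws ≠ []) :
    ws.flatMap (fun w => ' ' :: w) = ' ' :: PySem.Chars.join [' '] ws := by
  induction ws with
  | nil => exact absurd rfl h
  | cons w ws ih =>
    cases ws with
    | nil => simp [PySem.Chars.join_singleton]
    | cons w' ws' =>
      rw [List.flatMap_cons, ih (by simp), PySem.Chars.join_cons_cons]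
      simp

theorem pv_flat_decomp (ws : List (List Char)) (h : ['-'] ∈ ws) :
    ∃ t, ws.flatMap (fun w => ' ' :: w)
      = (pvCut ws).flatMap (fun w => ' ' :: w) ++ [' ', '-'] ++ t := by
  induction ws with
  | nil => simp at h
  | cons w ws ih =>
    by_cases hw : w = ['-']
    · subst hw
      exact ⟨ws.flatMap (fun w => ' ' :: w), by simp [pvCut]⟩
    · rcases ih (by rcases List.mem_cons.mp h with h' | h'; exact absurd h'.symm hw; exact h') with ⟨t, ht⟩
      exact ⟨t, by simp [pvCut, hw, ht]⟩

theorem pv_findgo_skip (cs : List Char) (tail : List Char) (h : ' ' ∉ cs) :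
    ∀ k, PySem.Chars.find.go [' ', '-', ' '] (cs ++ tail) k
      = PySem.Chars.find.go [' ', '-', ' '] tail (k + cs.length) := by
  induction cs with
  | nil => intro k; simp
  | cons c cs ih =>
    intro k
    simp only [List.mem_cons, not_or] at h
    rw [List.cons_append, PySem.Chars.find.go]
    rw [if_neg (by simp [List.isPrefixOf]; intro e; exact absurd e h.1)]
    rw [ih h.2 (k + 1)]
    congr 1
    simp; omega

-- the characterisation of the " - " search on the flat word string
theorem pv_findgo_words (ws : List (List Char)) (hg : ∀ w ∈ ws, pvGood w) :
    ∀ k : Nat, PySem.Chars.find.go [' ', '-', ' '] (ws.flatMap (fun w => ' ' :: w) ++ [' ']) k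
      = if ['-'] ∈ ws then ((k : Int) + ((pvCut ws).flatMap (fun w => ' ' :: w)).length) else -1 := by
  induction ws with
  | nil =>
    intro k
    simp only [List.flatMap_nil, List.nil_append, List.not_mem_nil, if_neg (not_false)]
    rw [PySem.Chars.find.go, if_neg (by decide), PySem.Chars.find.go]
    simp
  | cons w ws ih =>
    intro k
    have hgw := hg w (List.mem_cons_self)
    have hgws := fun w hw => hg w (List.mem_cons_of_mem _ hw)
    by_cases hw : w = ['-']
    · subst hw
      have htail : ∃ t, ws.flatMap (fun w => ' ' :: w) ++ [' '] = ' ' :: t := by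
        cases ws with
        | nil => exact ⟨[], rfl⟩
        | cons w' ws' => exact ⟨_, rfl⟩
      rcases htail with ⟨t, ht⟩
      rw [List.flatMap_cons, List.cons_append, List.cons_append, List.append_assoc, ht]
      rw [PySem.Chars.find.go, if_pos (by simp [List.isPrefixOf])]
      simp [pvCut]
    · rw [List.flatMap_cons, List.append_assoc, List.cons_append, PySem.Chars.find.go]
      rw [if_neg (by
        rcases hgw with ⟨hne, hsp⟩
        cases w with
        | nil => exact absurd rfl hne
        | cons c w' =>
          simp only [List.cons_append]
          simp only [List.mem_cons, not_or] at hsp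
          simp [List.isPrefixOf]
          intro e
          subst e
          cases w' with
          | nil => exact absurd rfl hw
          | cons d w'' =>
            simp only [List.cons_append, List.cons_prefix_cons]
            intro ⟨e, _⟩
            exact hsp.2 (List.mem_cons.mpr (Or.inl e)))]
      rw [pv_findgo_skip w _ hgw.2 (k + 1), ih hgws (k + 1 + w.length)]
      by_cases hm : ['-'] ∈ ws
      · rw [if_pos hm, if_pos (List.mem_cons_of_mem _ hm)]
        rw [pvCut, if_neg hw, List.flatMap_cons]
        simp only [List.length_append, List.length_cons]
        push_cast
        ring
      · rw [if_neg hm, if_neg (by simp [hm]; exact fun e => hw e.symm)]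

-- every word produced by str.split() is good
theorem pv_split₀_go_good (s : List Char) :
    ∀ (cur : List Char) (acc : List (List Char)),
      ' ' ∉ cur → (∀ w ∈ acc, pvGood w) →
      ∀ w ∈ PySem.Chars.split₀.go s cur acc, pvGood w := by
  induction s with
  | nil =>
    intro cur acc hcur hacc w hw
    rw [PySem.Chars.split₀.go] at hw
    by_cases hc : cur.isEmpty
    · rw [if_pos hc] at hw
      exact hacc w (by simpa using hw)
    · rw [if_neg hc] at hw
      simp only [List.mem_reverse, List.mem_cons] at hw
      rcases hw with h | h
      · subst h
        refine ⟨by simpa [List.isEmpty_iff] using hc, by simpa using hcur⟩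
      · exact hacc w (by simpa using h)
  | cons c rest ih =>
    intro cur acc hcur hacc w hw
    rw [PySem.Chars.split₀.go] at hw
    by_cases hs : PySem.Chars.isspace c
    · rw [if_pos hs] at hw
      by_cases hc : cur.isEmpty
      · rw [if_pos hc] at hw
        exact ih [] acc (by simp) hacc w hw
      · rw [if_neg hc] at hw
        refine ih [] _ (by simp) ?_ w hw
        intro w' hw'
        rcases List.mem_cons.mp hw' with h | h
        · subst h
          exact ⟨by simpa [List.isEmpty_iff] using hc, by simpa using hcur⟩
        · exact hacc w' h
    · rw [if_neg hs] at hw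
      refine ih (c :: cur) acc ?_ hacc w hw
      intro hmem
      rcases List.mem_cons.mp hmem with h | h
      · have hsp : PySem.Chars.isspace ' ' = true := by decide
        exact hs (h ▸ hsp)
      · exact hcur h

theorem pv_split₀_good (cs : List Char) :
    ∀ w ∈ PySem.Chars.split₀ cs, pvGood w := by
  rw [PySem.Chars.split₀]
  exact pv_split₀_go_good cs [] [] (by simp) (by simp)

-- A's loop-then-join equals B's pad-search-slice, over any good word list
theorem pv_main (wsS : List String) (hg : ∀ w ∈ wsS.map String.toList, pvGood w) :
    PySem.Str.join " " (format_key_loop wsS) =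
      (let s := PySem.Str.join " " wsS
       let padded := " " ++ s ++ " "
       let i := PySem.Str.find padded " - "
       if i == -1 then s else PySem.Str.slice padded (some 1) (some i)) := by
  simp only []
  have hpadded : (" " ++ PySem.Str.join " " wsS ++ " ").toList
      = ' ' :: (PySem.Chars.join [' '] (wsS.map String.toList)) ++ [' '] := by
    simp [PySem.Str.toList_join]
  have hfind : PySem.Str.find (" " ++ PySem.Str.join " " wsS ++ " ") " - "
      = PySem.Chars.find.go [' ', '-', ' '] (' ' :: (PySem.Chars.join [' '] (wsS.map String.toList)) ++ [' ']) 0 := by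
    rw [PySem.Str.find_eq, hpadded]
    rfl
  cases hwe : wsS.map String.toList with
  | nil =>
    have : wsS = [] := by simpa using hwe
    subst this
    rw [hfind]
    rw [List.map_nil] at *
    have hv : PySem.Chars.find.go [' ', '-', ' '] (' ' :: PySem.Chars.join [' '] ([] : List (List Char)) ++ [' ']) 0 = -1 := by decide
    rw [hv, if_pos (by decide)]
    rfl
  | cons w0 rest =>
    have hne : wsS.map String.toList ≠ [] := by rw [hwe]; simp
    have hflat : (wsS.map String.toList).flatMap (fun w => ' ' :: w) ++ [' ']
        = ' ' :: (PySem.Chars.join [' '] (wsS.map String.toList)) ++ [' '] := by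
      rw [pv_flatMap_eq _ hne]
    have hfind2 : PySem.Str.find (" " ++ PySem.Str.join " " wsS ++ " ") " - "
        = if ['-'] ∈ wsS.map String.toList
          then ((0 : Int) + ((pvCut (wsS.map String.toList)).flatMap (fun w => ' ' :: w)).length)
          else -1 := by
      rw [hfind, ← hflat, pv_findgo_words _ hg 0]
      norm_num
    by_cases hm : ['-'] ∈ wsS.map String.toList
    · rw [hfind2, if_pos hm]
      have hL : ((0 : Int) + ((pvCut (wsS.map String.toList)).flatMap (fun w => ' ' :: w)).length)
          = (((pvCut (wsS.map String.toList)).flatMap (fun w => ' ' :: w)).length : Int) := by ring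
      rw [hL]
      rw [if_neg (by
        simp only [beq_iff_eq]
        intro h
        omega)]
      refine String.toList_inj.mp ?_
      rw [PySem.Str.toList_join, PySem.Str.toList_slice, pv_map_toList_loop,
        PySem.Chars.slice_eq_listSlice, hpadded, ← pv_flatMap_eq _ hne]
      rcases pv_flat_decomp _ hm with ⟨t, ht⟩
      rw [ht]
      have hsl := PySem.List.slice_toNat
        (xs := (pvCut (wsS.map String.toList)).flatMap (fun w => ' ' :: w) ++ [' ', '-'] ++ t ++ [' '])
        (a := 1) (b := (((pvCut (wsS.map String.toList)).flatMap (fun w => ' ' :: w)).length : Int))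
        (by omega) (Int.natCast_nonneg _)
      rw [hsl]
      simp only [Int.toNat_natCast, Int.toNat_one]
      cases hc : pvCut (wsS.map String.toList) with
      | nil =>
        simp [hc]
      | cons c cs =>
        rw [hc] at *
        rw [pv_flatMap_eq (c :: cs) (by simp)]
        simp only [List.length_cons, List.append_assoc, List.cons_append]
        rw [List.drop_one]
        simp only [List.tail_cons]
        simp [Nat.add_sub_cancel, List.take_left]
    · rw [hfind2, if_neg hm, if_pos (by simp)]
      have hcut : pvCut (wsS.map String.toList) = wsS.map String.toList := pv_cut_of_not_mem _ hm
      have hloop : format_key_loop wsS = wsS := by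
        have h2 := pv_map_toList_loop wsS
        rw [hcut] at h2
        exact List.map_injective_iff.mpr (fun a b h => String.toList_inj.mp h) h2
      rw [hloop]

-- ===== VERDICT (by name: the statement is the Claim_ definition above) =====
theorem format_key_spec : Claim_equal_format_key := by
  intro key _
  unfold Spec_format_key format_key format_key_alt
  exact pv_main (PySem.Str.split₀ key)
    (by rw [PySem.Str.split₀_map_toList]; exact pv_split₀_good key.toList)
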